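-- pv_equiv track=rewrite | github.com/bangca85/python-for-kid | basic/buoi22/bai11.py | find_best_selling_product
-- ===== SOURCE A (Python) =====
-- def find_best_selling_product(transactions):
--     product_sales = {}
--
--     for transaction in transactions:
--         product_code, quantity, _ = transaction
--         if product_code in product_sales:
--             product_sales[product_code] += quantity
--         else:
--             product_sales[product_code] = quantity
--
--     best_selling_product = None
--     max_quantity = 0
--
--     for product_code, total_quantity in product_sales.items():
--         if total_quantity > max_quantity:
--             max_quantity = total_quantity
--             best_selling_product = product_code
--
--     return best_selling_product
-- ===== SOURCE B (Python) =====
-- def find_best_selling_product(transactions):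
--     totals = {}
--     for code, quantity, _ in transactions:
--         totals[code] = totals.get(code, 0) + quantity
--     ranked = sorted(totals.items(), key=lambda kv: -kv[1])
--     if ranked and ranked[0][1] > 0:
--         return ranked[0][0]
--     return None
-- ===== Notes on version B (the rewrite author's own statement) =====
-- stated objective: alternative
-- what changed: B keeps the single aggregation pass but replaces A's running-max scan (with its Option/max state) by a stable descending sort of the (code,total) items, returning the head's code when its total is positive; the dict update is also collapsed to get-with-default.
import Mathlib
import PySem

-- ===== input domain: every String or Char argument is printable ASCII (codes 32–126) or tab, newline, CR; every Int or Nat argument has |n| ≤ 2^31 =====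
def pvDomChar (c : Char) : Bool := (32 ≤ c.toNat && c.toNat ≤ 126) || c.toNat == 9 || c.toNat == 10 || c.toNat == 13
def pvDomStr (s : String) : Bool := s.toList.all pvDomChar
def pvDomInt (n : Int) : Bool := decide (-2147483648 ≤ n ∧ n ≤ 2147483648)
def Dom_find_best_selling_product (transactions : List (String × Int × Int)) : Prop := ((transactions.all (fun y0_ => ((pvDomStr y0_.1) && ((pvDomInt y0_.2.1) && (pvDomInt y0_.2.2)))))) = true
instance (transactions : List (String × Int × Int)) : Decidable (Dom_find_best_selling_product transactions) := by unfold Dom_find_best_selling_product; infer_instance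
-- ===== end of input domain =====

-- B replaces A's running-max scan over the aggregated totals by a stable descending
-- sort of the items, taking the head if its total is positive (objective: alternative).

-- ===== PORT A =====
def find_best_selling_product (transactions : List (String × Int × Int)) : Option String :=
  let product_sales : PySem.Dict String Int :=
    transactions.foldl
      (fun d t =>
        if d.contains t.1 then d.insert t.1 (d.getD t.1 0 + t.2.1)
        else d.insert t.1 t.2.1)
      PySem.Dict.empty
  let st : Option String × Int :=
    product_sales.items.foldl
      (fun acc p => if p.2 > acc.2 then (some p.1, p.2) else acc)
      (none, 0)
  st.1

-- ===== PORT B =====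
def find_best_selling_product_alt (transactions : List (String × Int × Int)) : Option String :=
  let totals : PySem.Dict String Int :=
    transactions.foldl (fun d t => d.insert t.1 (d.getD t.1 0 + t.2.1)) PySem.Dict.empty
  match PySem.List.sorted totals.items (fun kv => -kv.2) false with
  | (c, t) :: _ => if t > 0 then some c else none
  | [] => none

-- ===== PRECONDITION & SPEC =====
def Spec_find_best_selling_product (transactions : List (String × Int × Int)) (out : Option String) : Prop := out = find_best_selling_product_alt transactions
instance (transactions : List (String × Int × Int)) (out : Option String) : Decidable (Spec_find_best_selling_product transactions out) := by unfold Spec_find_best_selling_product; infer_instance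

-- ===== CLAIM (what is proved, stated in full; the proofs are below) =====
def Claim_equal_find_best_selling_product : Prop := ∀ (transactions : List (String × Int × Int)), Dom_find_best_selling_product transactions → Spec_find_best_selling_product transactions (find_best_selling_product transactions)

-- ===== LEMMAS AND PROOFS =====

-- The two aggregation folds build the same dict.
theorem pv_agg_eq (transactions : List (String × Int × Int)) (d : PySem.Dict String Int) :
    transactions.foldl
      (fun d t =>
        if d.contains t.1 then d.insert t.1 (d.getD t.1 0 + t.2.1)
        else d.insert t.1 t.2.1) d
    = transactions.foldl (fun d t => d.insert t.1 (d.getD t.1 0 + t.2.1)) d := by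
  induction transactions generalizing d with
  | nil => rfl
  | cons t rest ih =>
    simp only [List.foldl_cons]
    by_cases h : d.contains t.1 = true
    · rw [if_pos h]; exact ih _
    · rw [if_neg h, PySem.Dict.getD_of_not_contains _ _ (by simpa using h), zero_add]
      exact ih _

-- A's running-max scan seen through the head of the stable descending sort.
theorem pv_scan_eq (l : List (String × Int)) :
    l.foldl (fun (acc : Option String × Int) p => if p.2 > acc.2 then (some p.1, p.2) else acc)
      (none, 0)
    = (match (PySem.List.sorted l (fun kv => -kv.2) false).head? with
       | none => (none, 0)
       | some (c, t) => if 0 < t then (some c, t) else (none, 0)) := by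
  induction l using List.reverseRecOn with
  | nil => rfl
  | append_singleton l x ih =>
    have hsort : PySem.List.sorted (l ++ [x]) (fun kv => -kv.2) false
        = PySem.List.insertBy (fun a b => decide ((fun kv : String × Int => -kv.2) a < (fun kv : String × Int => -kv.2) b)) x
            (PySem.List.sorted l (fun kv => -kv.2) false) := by
      rw [PySem.List.sorted_eq_foldl_insertBy, PySem.List.sorted_eq_foldl_insertBy,
          List.foldl_append, List.foldl_cons, List.foldl_nil]
    rw [List.foldl_append, List.foldl_cons, List.foldl_nil, ih, hsort]
    cases hs : PySem.List.sorted l (fun kv => -kv.2) false with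
    | nil => simp [PySem.List.insertBy]
    | cons y ys =>
      obtain ⟨c, t⟩ := y
      obtain ⟨cx, tx⟩ := x
      simp only [PySem.List.insertBy, List.head?_cons]
      by_cases hlt : (-tx : Int) < -t
      · simp only [hlt, decide_true, if_true, List.head?_cons]
        by_cases hpos : (0:Int) < t
        · simp [hpos, (by omega : t < tx), (by omega : (0:Int) < tx)]
        · simp only [if_neg hpos]
      · simp only [hlt, decide_false, Bool.false_eq_true, if_false, List.head?_cons]
        by_cases hpos : (0:Int) < t
        · simp only [if_pos hpos]
          simp only [gt_iff_lt]
          rw [if_neg (by omega : ¬ t < tx)]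
        · simp only [if_neg hpos]
          simp only [gt_iff_lt]
          rw [if_neg (by omega : ¬ (0:Int) < tx)]

-- ===== VERDICT (by name: the statement is the Claim_ definition above) =====
theorem find_best_selling_product_spec : Claim_equal_find_best_selling_product := by
  intro transactions _
  unfold Spec_find_best_selling_product find_best_selling_product find_best_selling_product_alt
  dsimp only
  rw [pv_agg_eq, pv_scan_eq]
  cases hs : (PySem.List.sorted
      (transactions.foldl (fun d t => d.insert t.1 (d.getD t.1 0 + t.2.1)) PySem.Dict.empty).items
      (fun kv => -kv.2) false) with
  | nil => simp
  | cons y ys =>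
    obtain ⟨c, t⟩ := y
    by_cases h : (0:Int) < t <;> simp [h]
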